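-- pv_equiv track=rewrite | github.com/Ravenshaw3/watch-media-server | subtitle_service.py | convert_srt_to_vtt
-- ===== SOURCE A (Python) =====
-- def convert_srt_to_vtt(srt_content: str) -> str:
--     """Convert SRT subtitle content to VTT format"""
--     lines = srt_content.strip().split('\n')
--     vtt_lines = ['WEBVTT', '', '']
--
--     i = 0
--     while i < len(lines):
--         line = lines[i].strip()
--
--         # Skip empty lines
--         if not line:
--             i += 1
--             continue
--
--         # Skip sequence numbers
--         if line.isdigit():
--             i += 1
--             continue
--
--         # Process timestamp line
--         if '-->' in line:
--             # Convert SRT timestamp format to VTT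
--             timestamp = line.replace(',', '.')
--             vtt_lines.append(timestamp)
--             i += 1
--
--             # Collect subtitle text
--             subtitle_text = []
--             while i < len(lines) and lines[i].strip():
--                 subtitle_text.append(lines[i].strip())
--                 i += 1
--
--             if subtitle_text:
--                 vtt_lines.append('\n'.join(subtitle_text))
--                 vtt_lines.append('')
--         else:
--             i += 1
--
--     return '\n'.join(vtt_lines)
-- ===== SOURCE B (Python) =====
-- def _emit(block):
--     """VTT lines for one block of consecutive non-blank lines (recursive search for the timestamp line)."""
--     if not block:
--         return []
--     head, rest = block[0].strip(), block[1:]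
--     if '-->' not in head:
--         return _emit(rest)
--     out = [head.replace(',', '.')]
--     if rest:
--         out.append('\n'.join(ln.strip() for ln in rest))
--         out.append('')
--     return out
--
--
-- def convert_srt_to_vtt(srt_content: str) -> str:
--     """Convert SRT subtitle content to VTT format"""
--     lines = srt_content.strip().split('\n')
--     blocks, cur = [], []
--     for ln in lines:
--         if ln.strip():
--             cur.append(ln)
--         elif cur:
--             blocks.append(cur)
--             cur = []
--     if cur:
--         blocks.append(cur)
--     vtt = ['WEBVTT', '', '']
--     for block in blocks:
--         vtt += _emit(block)
--     return '\n'.join(vtt)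
-- ===== Notes on version B (the rewrite author's own statement) =====
-- stated objective: alternative
-- what changed: A's single interleaved index scan (while loop with manual i bookkeeping and a nested text-collecting while) is replaced by a partition-then-map decomposition: first group the lines into blank-separated blocks, then emit the VTT cue for each block with a small recursive per-block emitter.
import Mathlib
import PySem

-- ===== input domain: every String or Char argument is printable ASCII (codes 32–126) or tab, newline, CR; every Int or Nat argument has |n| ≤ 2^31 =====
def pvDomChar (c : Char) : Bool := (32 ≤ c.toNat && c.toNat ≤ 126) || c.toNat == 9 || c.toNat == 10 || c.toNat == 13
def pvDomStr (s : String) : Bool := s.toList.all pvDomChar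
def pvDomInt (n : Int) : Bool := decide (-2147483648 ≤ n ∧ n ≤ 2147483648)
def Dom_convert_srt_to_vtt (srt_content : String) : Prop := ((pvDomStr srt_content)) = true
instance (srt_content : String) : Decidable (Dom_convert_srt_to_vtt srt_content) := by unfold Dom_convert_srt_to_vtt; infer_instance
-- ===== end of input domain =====

-- B is a partition-then-map decomposition (blank-separated blocks, then one emitter per block)
-- instead of A's single interleaved index scan; objective: alternative/simpler structure, same cost.

-- ===== PORT A =====
-- the outer while loop of A: i-scan over the remaining lines, vtt_lines as accumulator;
-- the inner text-collecting while is the takeWhile/dropWhile pair over the same predicate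
def pvLoopA : List String → List String → List String
  | [], acc => acc
  | l :: ls, acc =>
    let line := PySem.Str.strip l
    if line = "" then pvLoopA ls acc
    else if PySem.Str.strIsdigit line then pvLoopA ls acc
    else if PySem.Str.isIn "-->" line then
      let ts := PySem.Str.replace line "," "."
      let text := (ls.takeWhile (fun x => PySem.Str.strip x != "")).map PySem.Str.strip
      let rest := ls.dropWhile (fun x => PySem.Str.strip x != "")
      if text.isEmpty then pvLoopA rest (acc ++ [ts])
      else pvLoopA rest (acc ++ [ts, PySem.Str.join "\n" text, ""])
    else pvLoopA ls acc
termination_by ls _ => ls.length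
decreasing_by
  all_goals first
  | (simp; exact List.length_dropWhile_le _ _)
  | simp

def convert_srt_to_vtt (srt_content : String) : String :=
  PySem.Str.join "\n" (pvLoopA ((PySem.Str.split? (PySem.Str.strip srt_content) "\n").getD []) ["WEBVTT", "", ""])

-- ===== PORT B =====
-- _emit of Source B: recursive search for the first timestamp line of a block
def pvEmitB : List String → List String
  | [] => []
  | b0 :: rest =>
    let head := PySem.Str.strip b0
    if PySem.Str.isIn "-->" head then
      if rest.isEmpty then [PySem.Str.replace head "," "."]
      else [PySem.Str.replace head "," ".",
            PySem.Str.join "\n" (rest.map PySem.Str.strip), ""]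
    else pvEmitB rest

-- the grouping loop of Source B, one foldl step per line
def pvBlockStep (st : List (List String) × List String) (ln : String) :
    List (List String) × List String :=
  if PySem.Str.strip ln != "" then (st.1, st.2 ++ [ln])
  else if st.2.isEmpty then st
  else (st.1 ++ [st.2], [])

def convert_srt_to_vtt_alt (srt_content : String) : String :=
  let lines := (PySem.Str.split? (PySem.Str.strip srt_content) "\n").getD []
  let p := lines.foldl pvBlockStep ([], [])
  let blocks := if p.2.isEmpty then p.1 else p.1 ++ [p.2]
  PySem.Str.join "\n" (blocks.foldl (fun acc b => acc ++ pvEmitB b) ["WEBVTT", "", ""])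

-- ===== PRECONDITION & SPEC =====
def Spec_convert_srt_to_vtt (srt_content : String) (out : String) : Prop := out = convert_srt_to_vtt_alt srt_content
instance (srt_content : String) (out : String) : Decidable (Spec_convert_srt_to_vtt srt_content out) := by unfold Spec_convert_srt_to_vtt; infer_instance

-- ===== CLAIM (what is proved, stated in full; the proofs are below) =====
def Claim_equal_convert_srt_to_vtt : Prop := ∀ (srt_content : String), Dom_convert_srt_to_vtt srt_content → Spec_convert_srt_to_vtt srt_content (convert_srt_to_vtt srt_content)

-- ===== LEMMAS AND PROOFS =====

-- reference recursive block decomposition: maximal runs of lines with non-empty strip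
def pvRecBlocks : List String → List (List String)
  | [] => []
  | l :: ls =>
    if PySem.Str.strip l != "" then
      (l :: ls.takeWhile (fun x => PySem.Str.strip x != "")) ::
        pvRecBlocks (ls.dropWhile (fun x => PySem.Str.strip x != ""))
    else pvRecBlocks ls
termination_by ls => ls.length
decreasing_by
  all_goals first
  | (simp; exact List.length_dropWhile_le _ _)
  | simp

theorem pvBlocks_eq (lines : List String) : ∀ (bs : List (List String)) (cur : List String),
    (let p := lines.foldl pvBlockStep (bs, cur);
     if p.2.isEmpty then p.1 else p.1 ++ [p.2]) =
    bs ++ (if cur.isEmpty then pvRecBlocks lines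
           else (cur ++ lines.takeWhile (fun x => PySem.Str.strip x != "")) ::
                pvRecBlocks (lines.dropWhile (fun x => PySem.Str.strip x != ""))) := by
  induction lines with
  | nil =>
    intro bs cur
    by_cases hc : cur.isEmpty <;> simp [hc, pvRecBlocks]
  | cons l ls ih =>
    intro bs cur
    by_cases hl : PySem.Str.strip l != ""
    · by_cases hc : cur.isEmpty
      · have hcur : cur = [] := List.isEmpty_iff.mp hc
        subst hcur
        simp only [List.foldl_cons, pvBlockStep, hl, if_pos, List.nil_append]
        rw [ih]
        simp [pvRecBlocks, hl, List.takeWhile_cons, List.dropWhile_cons]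
      · simp only [List.foldl_cons, pvBlockStep, hl, if_pos]
        rw [ih]
        have h1 : (cur ++ [l]).isEmpty = false := by simp
        simp [hc, h1, List.takeWhile_cons, List.dropWhile_cons, hl]
    · have hl' : (PySem.Str.strip l != "") = false := by simpa using hl
      by_cases hc : cur.isEmpty
      · have hcur : cur = [] := List.isEmpty_iff.mp hc
        subst hcur
        simp only [List.foldl_cons, pvBlockStep, hl', Bool.false_eq_true, if_neg,
          List.isEmpty_nil, if_pos]
        rw [ih]
        simp [pvRecBlocks, hl']
      · simp only [List.foldl_cons, pvBlockStep, hl', Bool.false_eq_true, if_neg, hc,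
          Bool.true_eq_false]
        rw [ih]
        simp [hc, pvRecBlocks, hl', List.takeWhile_cons, List.dropWhile_cons]

theorem pv_digit_no_arrow (s : String) (h : PySem.Str.strIsdigit s = true) :
    PySem.Str.isIn "-->" s = false := by
  cases hI : PySem.Str.isIn "-->" s with
  | false => rfl
  | true =>
    exfalso
    have hinf := (PySem.Str.isIn_iff_infix _ _).mp hI
    have hm : '-' ∈ s.toList := hinf.sublist.subset (by simp)
    rw [PySem.Str.strIsdigit_eq] at h
    simp only [PySem.Chars.strIsdigit, Bool.and_eq_true, List.all_eq_true] at h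
    have := h.2 '-' hm
    simp [PySem.Chars.isdigit] at this

theorem pvFlat_split (ls : List String) :
    (pvRecBlocks ls).flatMap pvEmitB =
      pvEmitB (ls.takeWhile (fun x => PySem.Str.strip x != "")) ++
      (pvRecBlocks (ls.dropWhile (fun x => PySem.Str.strip x != ""))).flatMap pvEmitB := by
  cases ls with
  | nil => simp [pvEmitB]
  | cons l ls =>
    by_cases hl : PySem.Str.strip l != ""
    · simp [pvRecBlocks, hl, List.takeWhile_cons, List.dropWhile_cons]
    · have hl' : (PySem.Str.strip l != "") = false := by simpa using hl
      simp [pvRecBlocks, hl', List.takeWhile_cons, List.dropWhile_cons, pvEmitB]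

theorem pvLoopA_eq (ls acc : List String) :
    pvLoopA ls acc = acc ++ (pvRecBlocks ls).flatMap pvEmitB := by
  induction ls, acc using pvLoopA.induct with
  | case1 acc => simp [pvLoopA, pvRecBlocks]
  | case2 l ls acc line hline ih =>
    simp only [line] at hline
    have hl' : (PySem.Str.strip l != "") = false := by simp [hline]
    rw [pvLoopA]
    simp only [hline, if_pos]
    rw [ih]
    simp [pvRecBlocks, hl']
  | case3 l ls acc line hne hdig ih =>
    simp only [line] at hne hdig
    have hl : (PySem.Str.strip l != "") = true := by simp [hne]
    have hno : PySem.Str.isIn "-->" (PySem.Str.strip l) = false := pv_digit_no_arrow _ hdig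
    rw [pvLoopA]
    simp only [hne, if_neg, hdig, if_pos]
    rw [ih, pvFlat_split ls]
    rw [show pvRecBlocks (l :: ls) =
      (l :: List.takeWhile (fun x => PySem.Str.strip x != "") ls) ::
        pvRecBlocks (List.dropWhile (fun x => PySem.Str.strip x != "") ls) from by
      rw [pvRecBlocks]; simp [hl]]
    rw [List.flatMap_cons]
    rw [show pvEmitB (l :: List.takeWhile (fun x => PySem.Str.strip x != "") ls) =
      pvEmitB (List.takeWhile (fun x => PySem.Str.strip x != "") ls) from by
      rw [pvEmitB]; simp only [hno, Bool.false_eq_true, if_false]]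
    simp
  | case4 l ls acc line hne hdig harr ts text rest htext ih =>
    simp only [line] at hne hdig harr
    simp only [text] at htext
    simp only [line, ts, text, rest] at ih
    have hl : (PySem.Str.strip l != "") = true := by simp [hne]
    have htw : List.takeWhile (fun x => PySem.Str.strip x != "") ls = [] := by
      simpa using htext
    rw [pvLoopA]
    simp only [line, ts, text, rest, hne, if_neg, hdig, Bool.not_eq_true, harr, if_pos, htw,
      List.map_nil, List.isEmpty_nil]
    rw [ih]
    rw [show pvRecBlocks (l :: ls) =
      (l :: List.takeWhile (fun x => PySem.Str.strip x != "") ls) ::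
        pvRecBlocks (List.dropWhile (fun x => PySem.Str.strip x != "") ls) from by
      rw [pvRecBlocks]; simp [hl]]
    rw [List.flatMap_cons, htw]
    rw [show pvEmitB [l] = [PySem.Str.replace (PySem.Str.strip l) "," "."] from by
      rw [pvEmitB]; simp only [harr, if_true, List.isEmpty_nil, if_pos]]
    simp
  | case5 l ls acc line hne hdig harr ts text rest htext ih =>
    simp only [line] at hne hdig harr
    simp only [text] at htext
    simp only [line, ts, text, rest] at ih
    have hl : (PySem.Str.strip l != "") = true := by simp [hne]
    have htw : (List.takeWhile (fun x => PySem.Str.strip x != "") ls).isEmpty = false := by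
      simpa [List.isEmpty_iff] using htext
    rw [pvLoopA]
    simp only [line, ts, text, rest, hne, if_neg, hdig, Bool.not_eq_true, harr, if_pos,
      List.isEmpty_map, htw, Bool.false_eq_true, if_false]
    rw [ih]
    rw [show pvRecBlocks (l :: ls) =
      (l :: List.takeWhile (fun x => PySem.Str.strip x != "") ls) ::
        pvRecBlocks (List.dropWhile (fun x => PySem.Str.strip x != "") ls) from by
      rw [pvRecBlocks]; simp [hl]]
    rw [List.flatMap_cons]
    rw [show pvEmitB (l :: List.takeWhile (fun x => PySem.Str.strip x != "") ls) =
      [PySem.Str.replace (PySem.Str.strip l) "," ".",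
       PySem.Str.join "\n" ((List.takeWhile (fun x => PySem.Str.strip x != "") ls).map PySem.Str.strip),
       ""] from by
      rw [pvEmitB]; simp only [harr, if_true, htw, Bool.false_eq_true, if_false]]
    simp
  | case6 l ls acc line hne hdig harr ih =>
    simp only [line] at hne hdig harr
    have hl : (PySem.Str.strip l != "") = true := by simp [hne]
    have hno : PySem.Str.isIn "-->" (PySem.Str.strip l) = false := by
      simpa using harr
    rw [pvLoopA]
    simp only [hne, if_neg, hdig, Bool.not_eq_true, hno, Bool.false_eq_true, if_false]
    rw [ih, pvFlat_split ls]
    rw [show pvRecBlocks (l :: ls) =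
      (l :: List.takeWhile (fun x => PySem.Str.strip x != "") ls) ::
        pvRecBlocks (List.dropWhile (fun x => PySem.Str.strip x != "") ls) from by
      rw [pvRecBlocks]; simp [hl]]
    rw [List.flatMap_cons]
    rw [show pvEmitB (l :: List.takeWhile (fun x => PySem.Str.strip x != "") ls) =
      pvEmitB (List.takeWhile (fun x => PySem.Str.strip x != "") ls) from by
      rw [pvEmitB]; simp only [hno, Bool.false_eq_true, if_false]]

theorem pvFoldl_append (bs : List (List String)) : ∀ acc,
    bs.foldl (fun acc b => acc ++ pvEmitB b) acc = acc ++ bs.flatMap pvEmitB := by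
  induction bs with
  | nil => simp
  | cons b bs ih => intro acc; simp [List.foldl, ih, List.flatMap_cons]

theorem pvMain (L : List String) :
    PySem.Str.join "\n" (pvLoopA L ["WEBVTT", "", ""]) =
    (let p := L.foldl pvBlockStep ([], []);
     let blocks := if p.2.isEmpty then p.1 else p.1 ++ [p.2];
     PySem.Str.join "\n" (blocks.foldl (fun acc b => acc ++ pvEmitB b) ["WEBVTT", "", ""])) := by
  have h := pvBlocks_eq L [] []
  simp only [List.isEmpty_nil, List.nil_append, if_pos] at h
  simp only [pvLoopA_eq, pvFoldl_append, h]

-- ===== VERDICT (by name: the statement is the Claim_ definition above) =====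
theorem convert_srt_to_vtt_spec : Claim_equal_convert_srt_to_vtt := by
  intro s _
  exact pvMain ((PySem.Str.split? (PySem.Str.strip s) "\n").getD [])
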